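-- pv_equiv track=rewrite | github.com/SAG145/Project-Euler | PEP239 - Twenty-two Foolish Primes.py | deploy
-- ===== SOURCE A (Python) =====
-- from math import comb, factorial
--
-- def deploy(m,n):
--     if n == 1:
--         return m - 1
--     if m == 1:
--         return 1
--     if m == n:
--         d = factorial(m)
--         for i in range(1,m + 1):
--             d += (-1)**i*comb(m,i)*factorial(m - i)
--         return d
--     d = 0
--     for j in range(max(0,2*n - m),n + 1):
--         d += comb(n,j)*deploy(n,j)*factorial(m - n) // factorial(m - 2*n + j)
--     return d
-- ===== SOURCE B (Python) =====
-- from math import comb, factorial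
--
-- def _combine(m, n, row_n):
--     # deploy(m, n) for m > n >= 0 (n != 1, m != 1), given row_n[j] = deploy(n, j)
--     fmn = factorial(m - n)
--     return sum(comb(n, j) * row_n[j] * fmn // factorial(m - 2 * n + j)
--                for j in range(max(0, 2 * n - m), n + 1))
--
-- def _table(n):
--     # rows[a][b] = deploy(a, b) for 0 <= b <= a <= n, bottom-up
--     ders = 1  # derangement count of a elements, maintained by D(a) = a*D(a-1) + (-1)^a
--     rows = []
--     for a in range(n + 1):
--         if a > 0:
--             ders = a * ders + (-1) ** a
--         row = []
--         for b in range(a + 1):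
--             if b == 1:
--                 row.append(a - 1)
--             elif a == 1:
--                 row.append(1)
--             elif b == 0:
--                 row.append(1)
--             elif b == a:
--                 row.append(ders)
--             else:
--                 row.append(_combine(a, b, rows[b]))
--         rows.append(row)
--     return rows
--
-- def deploy(m, n):
--     if n == 1:
--         return m - 1
--     if m == 1:
--         return 1
--     if n < 0 or m < n:
--         return 0
--     if n == 0:
--         return 1
--     rows = _table(n)
--     if m == n:
--         return rows[n][n]
--     return _combine(m, n, rows[n])
-- ===== Notes on version B (the rewrite author's own statement) =====
-- stated objective: faster
-- what changed: Replaces A's naive exponential recursion with a bottom-up dynamic-programming table over all pairs (a,b) with 0 <= b <= a <= n, maintaining the diagonal by the derangement recurrence D(a)=a*D(a-1)+(-1)^a instead of re-evaluating A's inclusion-exclusion sum and overlapping recursive calls.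
import Mathlib
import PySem

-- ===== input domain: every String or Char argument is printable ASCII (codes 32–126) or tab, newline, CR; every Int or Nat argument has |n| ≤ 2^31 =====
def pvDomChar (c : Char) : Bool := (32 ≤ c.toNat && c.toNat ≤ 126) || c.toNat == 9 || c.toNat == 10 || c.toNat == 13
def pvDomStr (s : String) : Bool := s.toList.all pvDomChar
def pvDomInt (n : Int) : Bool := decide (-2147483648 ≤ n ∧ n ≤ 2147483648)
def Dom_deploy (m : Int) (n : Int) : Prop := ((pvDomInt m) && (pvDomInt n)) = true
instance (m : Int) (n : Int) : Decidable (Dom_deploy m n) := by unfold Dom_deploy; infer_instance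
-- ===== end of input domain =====

-- B replaces A's exponential naive recursion by a bottom-up table (dynamic programming)
-- over the pairs (a, b), 0 ≤ b ≤ a ≤ n, with the diagonal maintained by the derangement
-- recurrence D(a) = a·D(a-1) + (-1)^a; equality of return values is proved on Pre_deploy.

-- shared helpers: math.factorial / math.comb (both Pythons import them; only applied to
-- nonnegative arguments on the admitted inputs, where toNat is exact)
def ifact (x : Int) : Int := (Nat.factorial x.toNat : Int)
def icomb (a b : Int) : Int := (Nat.choose a.toNat b.toNat : Int)

-- ===== PORT A =====
-- termination measure fact for A's recursion (cited by name in deploy's decreasing_by)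
theorem deploy_dec (m n j : Int) (h3 : m ≠ n) (h1 : max 0 (2 * n - m) ≤ j) (h2 : j < n + 1) :
    (n + j).toNat < (m + n).toNat := by omega

def deploy (m : Int) (n : Int) : Int :=
  if _h1 : n = 1 then m - 1
  else if _h2 : m = 1 then 1
  else if _h3 : m = n then
    -- d = factorial(m); for i in range(1, m+1): d += (-1)**i * comb(m,i) * factorial(m-i)
    (PySem.List.pyRange 1 (m + 1) 1).foldl
      (fun d i => d + (-1) ^ i.toNat * icomb m i * ifact (m - i)) (ifact m)
  else
    -- d = 0; for j in range(max(0, 2n-m), n+1): d += comb(n,j)*deploy(n,j)*factorial(m-n) // factorial(m-2n+j)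
    (PySem.List.pyRange (max 0 (2 * n - m)) (n + 1) 1).attach.foldl
      (fun d j => d + PySem.Int.floordiv (icomb n j.1 * deploy n j.1 * ifact (m - n))
                        (ifact (m - 2 * n + j.1))) 0
termination_by (m + n).toNat
decreasing_by
  exact deploy_dec m n j.1 _h3 (PySem.List.mem_pyRange_one.mp j.2).1
    (PySem.List.mem_pyRange_one.mp j.2).2

-- ===== PORT B =====
-- _combine(m, n, row_n): row_n[j] is always indexed in range (0 ≤ j ≤ n < len row_n), so pyGetD is exact
def combine (m : Int) (n : Int) (row : List Int) : Int :=
  (PySem.List.pyRange (max 0 (2 * n - m)) (n + 1) 1).foldl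
    (fun d j => d + PySem.Int.floordiv (icomb n j * PySem.List.pyGetD row j 0 * ifact (m - n))
                      (ifact (m - 2 * n + j))) 0

def buildRow (rows : List (List Int)) (a : Nat) (ders : Int) : List Int :=
  (List.range (a + 1)).map fun b =>
    if b = 1 then (a : Int) - 1
    else if a = 1 then 1
    else if b = 0 then 1
    else if b = a then ders
    else combine (a : Int) (b : Int) (rows.getD b [])

-- _table(n): returns (rows, ders) after processing a = 0 .. n
def buildTable : Nat → List (List Int) × Int
  | 0 => ([[1]], 1)
  | n + 1 =>
    let p := buildTable n
    let d := ((n : Int) + 1) * p.2 + (-1) ^ (n + 1)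
    (p.1 ++ [buildRow p.1 (n + 1) d], d)

def deploy_alt (m : Int) (n : Int) : Int :=
  if n = 1 then m - 1
  else if m = 1 then 1
  else if n < 0 ∨ m < n then 0
  else if n = 0 then 1
  else if m = n then ((buildTable n.toNat).1.getD n.toNat []).getD n.toNat 0
  else combine m n ((buildTable n.toNat).1.getD n.toNat [])

-- ===== PRECONDITION & SPEC =====
-- Pre_ excludes exactly m = n < 0, where A calls factorial on a negative number and raises ValueError.
def Pre_deploy (m : Int) (n : Int) : Prop := ¬ (m = n ∧ m < 0)
instance (m : Int) (n : Int) : Decidable (Pre_deploy m n) := by unfold Pre_deploy; infer_instance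
def pvWitness_deploy : Int × Int := (5, 3)

def Spec_deploy (m : Int) (n : Int) (out : Int) : Prop := out = deploy_alt m n
instance (m : Int) (n : Int) (out : Int) : Decidable (Spec_deploy m n out) := by unfold Spec_deploy; infer_instance

-- ===== CLAIM (what is proved, stated in full; the proofs are below) =====
def Claim_equal_deploy : Prop := ∀ (m : Int) (n : Int), Dom_deploy m n → Pre_deploy m n → Spec_deploy m n (deploy m n)

-- ===== LEMMAS AND PROOFS =====

-- the inclusion–exclusion sum that A's diagonal branch computes, as a list sum
def dterm (a i : Nat) : Int := (-1) ^ i * (a.choose i : Int) * ((a - i).factorial : Int)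
def Dnat (a : Nat) : Int := ((List.range (a + 1)).map (dterm a)).sum

lemma ifact_pos (x : Int) : 0 < ifact x := by
  unfold ifact; exact_mod_cast Nat.factorial_pos x.toNat

lemma dterm_succ (a i : Nat) (h : i ≤ a) : dterm (a + 1) i = ((a : Int) + 1) * dterm a i := by
  unfold dterm
  have key : (a + 1).choose i * (a + 1 - i).factorial
      = (a + 1) * (a.choose i * (a - i).factorial) := by
    have h1 := Nat.choose_mul_factorial_mul_factorial (Nat.le_succ_of_le h)
    have h2 := Nat.choose_mul_factorial_mul_factorial h
    apply Nat.eq_of_mul_eq_mul_right (Nat.factorial_pos i)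
    calc (a + 1).choose i * (a + 1 - i).factorial * i.factorial
        = (a + 1).choose i * i.factorial * (a + 1 - i).factorial := by ring
      _ = (a + 1).factorial := h1
      _ = (a + 1) * a.factorial := by rw [Nat.factorial_succ]
      _ = (a + 1) * (a.choose i * i.factorial * (a - i).factorial) := by rw [h2]
      _ = (a + 1) * (a.choose i * (a - i).factorial) * i.factorial := by ring
  have key' := congrArg (Nat.cast : Nat → Int) key
  push_cast at key'
  linear_combination ((-1 : Int)) ^ i * key'

lemma Dnat_succ (a : Nat) : Dnat (a + 1) = ((a : Int) + 1) * Dnat a + (-1) ^ (a + 1) := by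
  unfold Dnat
  rw [List.range_succ (n := a + 1), List.map_append, List.sum_append]
  have hlast : dterm (a + 1) (a + 1) = (-1) ^ (a + 1) := by
    unfold dterm; simp [Nat.choose_self]
  have hmap : (List.range (a + 1)).map (dterm (a + 1))
      = (List.range (a + 1)).map (fun i => ((a : Int) + 1) * dterm a i) := by
    apply List.map_congr_left
    intro i hi
    exact dterm_succ a i (Nat.lt_succ_iff.mp (List.mem_range.mp hi))
  rw [hmap, List.sum_map_mul_left]
  simp only [List.map_cons, List.map_nil, List.sum_cons, List.sum_nil, hlast]
  ring

lemma deploy_generic (m n : Int) (h1 : n ≠ 1) (h2 : m ≠ 1) (h3 : m ≠ n) :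
    deploy m n = (PySem.List.pyRange (max 0 (2 * n - m)) (n + 1) 1).foldl
      (fun d j => d + PySem.Int.floordiv (icomb n j * deploy n j * ifact (m - n))
                        (ifact (m - 2 * n + j))) 0 := by
  conv_lhs => rw [deploy]
  rw [dif_neg h1, dif_neg h2, dif_neg h3]
  exact List.foldl_attach (f := fun d j => d + PySem.Int.floordiv (icomb n j * deploy n j * ifact (m - n)) (ifact (m - 2 * n + j)))

lemma deploy_diag (a : Nat) : deploy (a : Int) (a : Int) = Dnat a := by
  match a with
  | 0 =>
    rw [deploy]
    norm_num
    decide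
  | 1 =>
    rw [deploy]
    norm_num
    decide
  | (k + 2) =>
    rw [deploy]
    rw [dif_neg (by push_cast; omega), dif_neg (by push_cast; omega), dif_pos rfl]
    rw [PySem.List.foldl_add, PySem.List.pyRange_one, List.map_map]
    push_cast
    have hlen : (((k : Int) + 2 + 1) - 1).toNat = k + 2 := by omega
    rw [hlen]
    have hmap : (List.range (k + 2)).map
        ((fun i : Int => (-1) ^ i.toNat * icomb ((k : Int) + 2) i * ifact (((k : Int) + 2) - i)) ∘ (fun j : Nat => (1 : Int) + j))
        = (List.range (k + 2)).map (fun j : Nat => dterm (k + 2) (j + 1)) := by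
      apply List.map_congr_left
      intro j hj
      have hj' : j < k + 2 := List.mem_range.mp hj
      simp only [Function.comp, dterm, icomb, ifact]
      have e1 : ((1 : Int) + (j : Int)).toNat = j + 1 := by omega
      have e2 : ((k : Int) + 2).toNat = k + 2 := by omega
      have e3 : (((k : Int) + 2) - (1 + (j : Int))).toNat = k + 2 - (j + 1) := by omega
      rw [e1, e2, e3]
    rw [hmap]
    have hD : Dnat (k + 2) = dterm (k + 2) 0 + ((List.range (k + 2)).map (fun j => dterm (k + 2) (j + 1))).sum := by
      unfold Dnat
      rw [List.range_succ_eq_map, List.map_cons, List.sum_cons, List.map_map]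
      rfl
    rw [hD]
    have h0 : dterm (k + 2) 0 = ifact ((k : Int) + 2) := by
      unfold dterm ifact
      have : ((k : Int) + 2).toNat = k + 2 := by omega
      rw [this]
      simp
    rw [h0]

lemma deploy_zero_zero : deploy 0 0 = 1 := by
  have := deploy_diag 0
  simpa using this

lemma deploy_pos_zero (m : Int) (hm : 2 ≤ m) : deploy m 0 = 1 := by
  rw [deploy_generic m 0 (by omega) (by omega) (by omega)]
  have hmax : max 0 (2 * 0 - m) = 0 := by omega
  rw [hmax]
  rw [PySem.List.pyRange_one_singleton]
  simp only [List.foldl_cons, List.foldl_nil, zero_add]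
  have h00 : deploy 0 0 = 1 := deploy_zero_zero
  have hicomb : icomb 0 0 = 1 := by decide
  rw [h00, hicomb]
  have harg : m - 2 * 0 + 0 = m - 2 * 0 + 0 := rfl
  have hpos := ifact_pos (m - 2 * 0 + 0)
  rw [PySem.Int.floordiv_eq_ediv_of_pos hpos]
  have hsame : m - 0 = m - 2 * 0 + 0 := by ring
  rw [hsame]
  simpa using Int.ediv_self hpos.ne'

lemma combine_correct (m n : Int) (row : List Int) (hn : 2 ≤ n) (hm : n < m)
    (hrow : ∀ j : Int, 0 ≤ j → j ≤ n → PySem.List.pyGetD row j 0 = deploy n j) :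
    combine m n row = deploy m n := by
  rw [deploy_generic m n (by omega) (by omega) (by omega)]
  unfold combine
  apply PySem.List.foldl_congr_mem
  intro acc j hjmem
  have hj := PySem.List.mem_pyRange_one.mp hjmem
  rw [hrow j (by omega) (by omega)]

lemma buildTable_length (N : Nat) : (buildTable N).1.length = N + 1 := by
  induction N with
  | zero => rfl
  | succ k ih => simp [buildTable, ih]

lemma buildTable_snd (N : Nat) : (buildTable N).2 = Dnat N := by
  induction N with
  | zero => decide
  | succ k ih =>
    show ((k : Int) + 1) * (buildTable k).2 + (-1) ^ (k + 1) = Dnat (k + 1)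
    rw [ih, Dnat_succ]

lemma buildTable_entry (N : Nat) : ∀ a b : Nat, a ≤ N → b ≤ a →
    (((buildTable N).1.getD a []).getD b 0) = deploy (a : Int) (b : Int) := by
  induction N with
  | zero =>
    intro a b ha hb
    interval_cases a
    interval_cases b
    simpa using deploy_zero_zero.symm
  | succ k ih =>
    intro a b ha hb
    by_cases hak : a ≤ k
    · have hlt : a < (buildTable k).1.length := by rw [buildTable_length]; omega
      show (((buildTable k).1 ++ [_]).getD a []).getD b 0 = _
      rw [List.getD_append _ _ _ _ hlt]
      exact ih a b hak hb
    · have ha' : a = k + 1 := by omega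
      subst ha'
      have hrowd : ((buildTable k).1 ++ [buildRow (buildTable k).1 (k + 1) (((k : Int) + 1) * (buildTable k).2 + (-1) ^ (k + 1))]).getD (k + 1) []
          = buildRow (buildTable k).1 (k + 1) (((k : Int) + 1) * (buildTable k).2 + (-1) ^ (k + 1)) := by
        have hl := buildTable_length k
        rw [List.getD_eq_getElem?_getD]
        rw [show k + 1 = (buildTable k).1.length from hl.symm]
        rw [List.getElem?_concat_length]
        rfl
      show ((((buildTable k).1 ++ [_]).getD (k + 1) []).getD b 0) = _
      rw [hrowd]
      unfold buildRow
      rw [PySem.List.getD_map_range _ _ _ _ (by omega)]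
      by_cases hb1 : b = 1
      · subst hb1
        rw [if_pos rfl, deploy]
        norm_num
      rw [if_neg hb1]
      by_cases hk0 : k + 1 = 1
      · have : k = 0 := by omega
        subst this
        rw [if_pos rfl]
        have hb0 : b = 0 := by omega
        subst hb0
        rw [deploy]
        norm_num
      rw [if_neg hk0]
      by_cases hb0 : b = 0
      · subst hb0
        rw [if_pos rfl]
        exact (deploy_pos_zero _ (by push_cast; omega)).symm
      rw [if_neg hb0]
      by_cases hba : b = k + 1
      · subst hba
        rw [if_pos rfl]
        have hsnd : ((k : Int) + 1) * (buildTable k).2 + (-1) ^ (k + 1) = Dnat (k + 1) := by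
          rw [buildTable_snd, Dnat_succ]
        rw [hsnd]
        exact (deploy_diag (k + 1)).symm
      rw [if_neg hba]
      -- 2 ≤ b < k + 1
      have hb2 : 2 ≤ b := by omega
      apply combine_correct
      · exact_mod_cast hb2
      · push_cast; omega
      · intro j hj0 hjb
        rw [PySem.List.pyGetD_of_nonneg _ _ hj0]
        have := ih b j.toNat (by omega) (by omega)
        rw [this]
        congr 1
        omega

theorem main_eq (m n : Int) (hpre : Pre_deploy m n) : deploy m n = deploy_alt m n := by
  unfold Pre_deploy at hpre
  by_cases h1 : n = 1
  · subst h1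
    rw [deploy, dif_pos rfl]
    simp [deploy_alt]
  by_cases h2 : m = 1
  · subst h2
    rw [deploy, dif_neg h1, dif_pos rfl]
    simp [deploy_alt, h1]
  by_cases h3 : n < 0 ∨ m < n
  · have hmn : m ≠ n := by
      rintro rfl
      rcases h3 with h | h
      · exact hpre ⟨rfl, h⟩
      · omega
    rw [deploy_generic m n h1 h2 hmn]
    rw [PySem.List.pyRange_one_eq_nil (by omega)]
    unfold deploy_alt
    rw [if_neg h1, if_neg h2, if_pos h3]
    rfl
  by_cases h4 : n = 0
  · subst h4
    have halt : deploy_alt m 0 = 1 := by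
      unfold deploy_alt
      rw [if_neg (by norm_num : ¬(0 : Int) = 1), if_neg h2,
        if_neg (by omega : ¬((0 : Int) < 0 ∨ m < 0)), if_pos rfl]
    rw [halt]
    by_cases hm : m = 0
    · subst hm; exact deploy_zero_zero
    · exact deploy_pos_zero m (by omega)
  · have hn2 : 2 ≤ n := by omega
    have hcast : ((n.toNat : Int)) = n := Int.toNat_of_nonneg (by omega)
    have hrow : ∀ j : Int, 0 ≤ j → j ≤ n →
        PySem.List.pyGetD ((buildTable n.toNat).1.getD n.toNat []) j 0 = deploy n j := by
      intro j hj0 hjn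
      rw [PySem.List.pyGetD_of_nonneg _ _ hj0]
      have := buildTable_entry n.toNat n.toNat j.toNat le_rfl (by omega)
      rw [this, hcast]
      congr 1
      omega
    by_cases h5 : m = n
    · have halt : deploy_alt m n = ((buildTable n.toNat).1.getD n.toNat []).getD n.toNat 0 := by
        unfold deploy_alt
        rw [if_neg h1, if_neg h2, if_neg (by omega : ¬(n < 0 ∨ m < n)), if_neg h4, if_pos h5]
      rw [halt]
      have := buildTable_entry n.toNat n.toNat n.toNat le_rfl le_rfl
      rw [this, hcast, h5]
    · have halt : deploy_alt m n = combine m n ((buildTable n.toNat).1.getD n.toNat []) := by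
        unfold deploy_alt
        rw [if_neg h1, if_neg h2, if_neg (by omega : ¬(n < 0 ∨ m < n)), if_neg h4, if_neg h5]
      rw [halt]
      exact (combine_correct m n _ hn2 (by omega) hrow).symm

-- ===== VERDICT (by name: the statement is the Claim_ definition above) =====
theorem deploy_spec : Claim_equal_deploy := by
  intro m n _hdom hpre
  unfold Spec_deploy
  exact main_eq m n hpre
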